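-- pv_equiv track=rewrite | github.com/RiccardoMengozzi/drl_exploration | build/drl_exploration/build/lib/utils/utils.py | generate_centers
-- ===== SOURCE A (Python) =====
-- import math
--
-- def generate_centers(n_points, step_x=15, step_y=15):
--     # Calculate grid dimensions to be as close to square as possible
--     cols = math.ceil(math.sqrt(n_points))  # Number of columns
--     rows = math.ceil(n_points / cols)      # Calculate corresponding rows
--
--     points = []
--
--     for row in range(rows):
--         for col in range(cols):
--             # Determine x and y positions
--             if row % 2 == 0:  # Even row: left to right
--                 x = col * step_x
--             else:  # Odd row: right to left
--                 x = (cols - 1 - col) * step_x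
--
--             y = row * step_y
--
--             # Append the point to the list if within the total number of points
--             if len(points) < n_points:
--                 points.append((x, y))
--
--     return points
-- ===== SOURCE B (Python) =====
-- import math
--
-- def generate_centers(n_points, step_x=15, step_y=15):
--     cols = math.ceil(math.sqrt(n_points))
--     # Flat enumeration: the i-th emitted point is computed directly from i by
--     # divmod, flipping the column on odd rows; no nested loops, no length guard.
--     points = []
--     for i in range(n_points):
--         row, col = divmod(i, cols)
--         if row % 2:
--             col = cols - 1 - col
--         points.append((col * step_x, row * step_y))
--     return points
-- ===== Notes on version B (the rewrite author's own statement) =====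
-- stated objective: alternative
-- what changed: Replaces A's nested row/column loops with a truncation guard by a single flat loop over the n point indices, computing each point's row and column directly via divmod(i, cols) and never materialising the unused rows count or the guard.
import Mathlib
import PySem

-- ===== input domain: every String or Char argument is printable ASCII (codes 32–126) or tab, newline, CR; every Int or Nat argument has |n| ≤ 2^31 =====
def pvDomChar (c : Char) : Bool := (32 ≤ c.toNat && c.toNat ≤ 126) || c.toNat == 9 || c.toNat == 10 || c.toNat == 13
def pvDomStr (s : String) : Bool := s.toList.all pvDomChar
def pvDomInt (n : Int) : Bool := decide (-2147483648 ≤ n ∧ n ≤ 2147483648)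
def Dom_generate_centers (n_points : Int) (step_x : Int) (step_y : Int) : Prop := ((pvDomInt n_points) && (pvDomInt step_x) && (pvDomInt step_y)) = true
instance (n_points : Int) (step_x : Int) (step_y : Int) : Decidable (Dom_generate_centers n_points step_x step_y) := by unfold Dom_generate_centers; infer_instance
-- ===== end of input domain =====

-- B enumerates the n points by a single flat loop over point indices, recovering row and
-- column by divmod(i, cols); A runs nested row/column loops under a truncation guard.
-- Same asymptotic cost; a different decomposition. Pre_ excludes n_points ≤ 0, where A raises.

-- ===== PORT A =====
-- math.ceil(math.sqrt n): exact integer ceiling of the real square root; exact for the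
-- Python on Pre_ (1 ≤ n ≤ 2^31, where a double sqrt cannot cross an integer boundary).
def pvCeilSqrt (n : Int) : Int :=
  let s : Int := (Nat.sqrt n.toNat : Int)
  if s * s = n then s else s + 1

-- math.ceil(n / cols): exact ceiling division -((-n) // cols); exact for the Python on
-- Pre_ (the float quotient is too far from any other integer to change the ceiling).
def pvCeilDiv (n cols : Int) : Int := -(PySem.Int.floordiv (-n) cols)

def generate_centers (n_points : Int) (step_x : Int) (step_y : Int) : List (Int × Int) :=
  let cols : Int := pvCeilSqrt n_points
  let rows : Int := pvCeilDiv n_points cols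
  (PySem.List.pyRange 0 rows 1).foldl (fun points row =>
    (PySem.List.pyRange 0 cols 1).foldl (fun points col =>
      let x : Int := if PySem.Int.mod row 2 = 0 then col * step_x else (cols - 1 - col) * step_x
      let y : Int := row * step_y
      if (points.length : Int) < n_points then points ++ [(x, y)] else points) points) []

-- ===== PORT B =====
def generate_centers_alt (n_points : Int) (step_x : Int) (step_y : Int) : List (Int × Int) :=
  let cols : Int := pvCeilSqrt n_points
  (PySem.List.pyRange 0 n_points 1).foldl (fun points i =>
    let row : Int := PySem.Int.floordiv i cols
    let col : Int := PySem.Int.mod i cols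
    let col : Int := if PySem.Int.mod row 2 ≠ 0 then cols - 1 - col else col
    points ++ [(col * step_x, row * step_y)]) []

-- ===== PRECONDITION & SPEC =====
-- Pre_ excludes n_points ≤ 0: there the Python A raises (ValueError from math.sqrt for
-- negatives, ZeroDivisionError for 0) and returns no value.
def Pre_generate_centers (n_points : Int) (step_x : Int) (step_y : Int) : Prop := 1 ≤ n_points
instance (n_points : Int) (step_x : Int) (step_y : Int) : Decidable (Pre_generate_centers n_points step_x step_y) := by unfold Pre_generate_centers; infer_instance
def pvWitness_generate_centers : Int × Int × Int := (5, 15, 15)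

def Spec_generate_centers (n_points : Int) (step_x : Int) (step_y : Int) (out : List (Int × Int)) : Prop := out = generate_centers_alt n_points step_x step_y
instance (n_points : Int) (step_x : Int) (step_y : Int) (out : List (Int × Int)) : Decidable (Spec_generate_centers n_points step_x step_y out) := by unfold Spec_generate_centers; infer_instance

-- ===== CLAIM (what is proved, stated in full; the proofs are below) =====
def Claim_equal_generate_centers : Prop := ∀ (n_points : Int) (step_x : Int) (step_y : Int), Dom_generate_centers n_points step_x step_y → Pre_generate_centers n_points step_x step_y → Spec_generate_centers n_points step_x step_y (generate_centers n_points step_x step_y)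

-- ===== LEMMAS AND PROOFS =====

-- The guarded append loop keeps exactly the first n - |acc| elements.
theorem pv_guard_take (n : Int) (L acc : List (Int × Int)) :
    L.foldl (fun pts p => if (pts.length : Int) < n then pts ++ [p] else pts) acc
      = acc ++ L.take (n.toNat - acc.length) := by
  induction L generalizing acc with
  | nil => simp
  | cons p L ih =>
    by_cases h : (acc.length : Int) < n
    · have h' : acc.length < n.toNat := by omega
      simp only [List.foldl_cons, if_pos h, ih]
      have : n.toNat - acc.length = (n.toNat - (acc ++ [p]).length) + 1 := by
        simp; omega
      rw [this]
      simp [List.take_succ_cons]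
    · have h' : n.toNat - acc.length = 0 := by omega
      simp only [List.foldl_cons, if_neg h, ih, h', List.take_zero, List.append_nil]

-- The body of B, as a plain function of the flat index.
def pvB (n sx sy : Int) (i : Int) : Int × Int :=
  let c := pvCeilSqrt n
  let row := PySem.Int.floordiv i c
  let col := PySem.Int.mod i c
  ((if PySem.Int.mod row 2 ≠ 0 then c - 1 - col else col) * sx, row * sy)

-- One row of the grid: B's body over the row's flat-index segment is A's row list.
theorem pv_row_block (n sx sy : Int) (c : Int) (hc : 0 < c) (hcc : c = pvCeilSqrt n) (k : Int) :
    (PySem.List.pyRange (k * c) ((k + 1) * c) 1).map (pvB n sx sy)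
      = (PySem.List.pyRange 0 c 1).map (fun col =>
          ((if PySem.Int.mod k 2 = 0 then col * sx else (c - 1 - col) * sx), k * sy)) := by
  apply List.ext_getElem
  · simp only [List.length_map, PySem.List.length_pyRange_one]
    congr 1; ring
  · intro j h1 h2
    simp only [List.getElem_map, PySem.List.getElem_pyRange_one]
    have hj : j < (c - 0).toNat := by
      simpa [PySem.List.length_pyRange_one] using h2
    have hjc : (j : Int) < c := by omega
    have hfd : PySem.Int.floordiv (k * c + j) c = k := by
      rw [PySem.Int.floordiv_eq_iff_of_pos hc]
      constructor
      · omega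
      · nlinarith
    have hmd : PySem.Int.mod (k * c + j) c = j := by
      have := PySem.Int.floordiv_mul_add_mod (k * c + j) c
      rw [hfd] at this; omega
    simp only [pvB, ← hcc, hfd, hmd, zero_add]
    have hme : PySem.Int.mod k 2 = k % 2 := by
      rw [PySem.Int.mod_eq_emod_of_pos]; norm_num
    rcases Int.emod_two_eq_zero_or_one k with h | h <;> simp only [hme, h] <;> norm_num

-- The whole grid, row by row, is B's body mapped over the flat indices 0 … rows*cols-1.
theorem pv_grid (n sx sy : Int) (c : Int) (hc : 0 < c) (hcc : c = pvCeilSqrt n) (r : Int) (hr : 0 ≤ r) :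
    (PySem.List.pyRange 0 r 1).flatMap (fun row =>
      (PySem.List.pyRange 0 c 1).map (fun col =>
        ((if PySem.Int.mod row 2 = 0 then col * sx else (c - 1 - col) * sx), row * sy)))
      = (PySem.List.pyRange 0 (r * c) 1).map (pvB n sx sy) := by
  obtain ⟨m, rfl⟩ : ∃ m : Nat, r = (m : Int) := ⟨r.toNat, by omega⟩
  induction m with
  | zero => simp [PySem.List.pyRange_one_eq_nil]
  | succ m ih =>
    have hm : (0 : Int) ≤ (m : Int) := by positivity
    have h1 : PySem.List.pyRange 0 ((m : Int) + 1) 1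
        = PySem.List.pyRange 0 (m : Int) 1 ++ [(m : Int)] :=
      PySem.List.pyRange_one_succ_right hm
    have h2 : PySem.List.pyRange 0 (((m : Int) + 1) * c) 1
        = PySem.List.pyRange 0 ((m : Int) * c) 1 ++ PySem.List.pyRange ((m : Int) * c) (((m : Int) + 1) * c) 1 := by
      apply PySem.List.pyRange_one_append <;> nlinarith
    push_cast
    rw [h1, h2, List.flatMap_append, List.map_append, ih hm]
    simp only [List.flatMap_cons, List.flatMap_nil, List.append_nil]
    rw [pv_row_block n sx sy c hc hcc (m : Int)]

-- The number of columns is positive once n ≥ 1.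
theorem pv_cols_pos (n : Int) (hn : 1 ≤ n) : 0 < pvCeilSqrt n := by
  have hdef : pvCeilSqrt n
      = if ((Nat.sqrt n.toNat : Int)) * (Nat.sqrt n.toNat : Int) = n
        then ((Nat.sqrt n.toNat : Int)) else ((Nat.sqrt n.toNat : Int)) + 1 := rfl
  have hs : (0 : Int) ≤ (Nat.sqrt n.toNat : Int) := by positivity
  rw [hdef]
  split_ifs with h
  · nlinarith
  · positivity

-- rows ≥ 0 and rows*cols ≥ n: the grid is large enough.
theorem pv_rows_bound (n : Int) (hn : 1 ≤ n) :
    0 ≤ pvCeilDiv n (pvCeilSqrt n) ∧ n ≤ pvCeilDiv n (pvCeilSqrt n) * pvCeilSqrt n := by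
  have hc := pv_cols_pos n hn
  set c := pvCeilSqrt n with hcc
  have hdm := PySem.Int.floordiv_mul_add_mod (-n) c
  have hm0 : 0 ≤ PySem.Int.mod (-n) c := PySem.Int.mod_nonneg (-n) hc
  have hm1 : PySem.Int.mod (-n) c < c := PySem.Int.mod_lt (-n) hc
  have hdef : pvCeilDiv n c = -(PySem.Int.floordiv (-n) c) := rfl
  constructor
  · rw [hdef]; nlinarith
  · rw [hdef]; nlinarith

-- ===== VERDICT (by name: the statement is the Claim_ definition above) =====
theorem generate_centers_spec : Claim_equal_generate_centers := by
  intro n sx sy _ hpre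
  have hn : 1 ≤ n := hpre
  simp only [Spec_generate_centers, generate_centers, generate_centers_alt]
  have hc := pv_cols_pos n hn
  set c := pvCeilSqrt n with hcc
  set r := pvCeilDiv n c with hrr
  obtain ⟨hr0, hrc⟩ := pv_rows_bound n hn
  rw [← hcc, ← hrr] at hr0 hrc
  -- A side: nested guarded loops = take n of the full grid = map of B's body over 0…n-1
  have hA : (PySem.List.pyRange 0 r 1).foldl (fun points row =>
      (PySem.List.pyRange 0 c 1).foldl (fun points col =>
        let x : Int := if PySem.Int.mod row 2 = 0 then col * sx else (c - 1 - col) * sx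
        let y : Int := row * sy
        if (points.length : Int) < n then points ++ [(x, y)] else points) points) []
      = (PySem.List.pyRange 0 n 1).map (pvB n sx sy) := by
    have hflat : (PySem.List.pyRange 0 r 1).foldl (fun points row =>
        (PySem.List.pyRange 0 c 1).foldl (fun points col =>
          let x : Int := if PySem.Int.mod row 2 = 0 then col * sx else (c - 1 - col) * sx
          let y : Int := row * sy
          if (points.length : Int) < n then points ++ [(x, y)] else points) points) []
        = ((PySem.List.pyRange 0 r 1).flatMap (fun row =>
            (PySem.List.pyRange 0 c 1).map (fun col =>
              ((if PySem.Int.mod row 2 = 0 then col * sx else (c - 1 - col) * sx), row * sy)))).foldl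
            (fun pts p => if (pts.length : Int) < n then pts ++ [p] else pts) [] := by
      rw [List.foldl_flatMap]
      congr 1
      funext acc row
      rw [List.foldl_map]
    rw [hflat, pv_grid n sx sy c hc hcc r hr0, pv_guard_take]
    simp only [List.nil_append, List.length_nil, Nat.sub_zero]
    have hsplit : PySem.List.pyRange 0 (r * c) 1
        = PySem.List.pyRange 0 n 1 ++ PySem.List.pyRange n (r * c) 1 :=
      PySem.List.pyRange_one_append 0 n (r * c) (by omega) hrc
    rw [hsplit, List.map_append]
    rw [List.take_append_of_le_length
      (by simp only [List.length_map, PySem.List.length_pyRange_one]; omega)]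
    rw [List.take_of_length_le
      (by simp only [List.length_map, PySem.List.length_pyRange_one]; omega)]
  rw [hA, PySem.List.foldl_append_singleton_eq_map, List.nil_append]
  apply List.map_congr_left
  intro i _
  simp only [pvB, ← hcc]
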